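-- pv_equiv track=rewrite | github.com/BykovIlya/timus | 2066.py | solution
-- ===== SOURCE A (Python) =====
-- def solution(a,b,c):
--     def sort(a, b, c):
--         array = [int(a), int(b), int(c)]
--         for i in range(len(array)):
--             for j in range(0, len(array) - i - 1):
--                 if array[j] > array[j + 1]:
--                     temp = array[j]
--                     array[j] = array[j+1]
--                     array[j+1] = temp
--         return array[0], array[1], array[2]
--     a,b,c = sort(a,b,c)
--     return a-b-c if a-b-c < a-b*c else a-b*c
-- ===== SOURCE B (Python) =====
-- def solution(a, b, c):
--     x, y, z = int(a), int(b), int(c)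
--     lo = min(x, y, z)
--     hi = max(x, y, z)
--     mid = x + y + z - lo - hi
--     return min(lo - mid - hi, lo - mid * hi)
-- ===== Notes on version B (the rewrite author's own statement) =====
-- stated objective: simpler
-- what changed: Replaces the hand-written bubble sort with an arithmetic computation of the order statistics (lo = min, hi = max, mid = sum - lo - hi) and the trailing ternary with min(), removing all loops.
import Mathlib
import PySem

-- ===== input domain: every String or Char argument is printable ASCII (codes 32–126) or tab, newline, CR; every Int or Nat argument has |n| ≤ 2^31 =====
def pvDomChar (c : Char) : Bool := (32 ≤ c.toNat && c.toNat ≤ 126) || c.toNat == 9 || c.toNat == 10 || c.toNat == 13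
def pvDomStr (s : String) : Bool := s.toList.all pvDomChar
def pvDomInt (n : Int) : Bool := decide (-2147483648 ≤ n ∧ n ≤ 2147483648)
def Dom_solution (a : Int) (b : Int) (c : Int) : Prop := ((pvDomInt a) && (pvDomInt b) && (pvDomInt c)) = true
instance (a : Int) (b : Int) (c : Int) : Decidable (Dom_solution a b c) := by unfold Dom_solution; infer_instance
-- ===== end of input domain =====

-- B removes A's bubble sort: it computes the order statistics arithmetically (lo = min, hi = max,
-- mid = sum - lo - hi) and replaces the trailing ternary with min() — simpler, no loops.


-- ===== PORT A =====
-- compare-and-swap at index j of the array, exactly Python's loop body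
-- (j ≥ 0 at every call site, so '.toNat' on the set indices is exact)
def pvBubbleStep (arr : List Int) (j : Int) : List Int :=
  match PySem.List.pyGet? arr j, PySem.List.pyGet? arr (j + 1) with
  | some x, some y =>
      if x > y then (arr.set j.toNat y).set (j + 1).toNat x else arr
  | _, _ => arr

def solution (a : Int) (b : Int) (c : Int) : Int :=
  -- int(a) on an int argument is the identity
  let array : List Int := [a, b, c]
  let array :=
    (PySem.List.pyRange 0 3 1).foldl
      (fun arr i => (PySem.List.pyRange 0 (3 - i - 1) 1).foldl pvBubbleStep arr) array
  match array with
  | [a', b', c'] =>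
      if a' - b' - c' < a' - b' * c' then a' - b' - c' else a' - b' * c'
  | _ => 0  -- unreachable: the array always has length 3

-- ===== PORT B =====
def solution_alt (a : Int) (b : Int) (c : Int) : Int :=
  let lo := min a (min b c)
  let hi := max a (max b c)
  let mid := a + b + c - lo - hi
  min (lo - mid - hi) (lo - mid * hi)

-- ===== PRECONDITION & SPEC =====
def Spec_solution (a : Int) (b : Int) (c : Int) (out : Int) : Prop := out = solution_alt a b c
instance (a : Int) (b : Int) (c : Int) (out : Int) : Decidable (Spec_solution a b c out) := by unfold Spec_solution; infer_instance

-- ===== CLAIM (what is proved, stated in full; the proofs are below) =====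
def Claim_equal_solution : Prop := ∀ (a : Int) (b : Int) (c : Int), Dom_solution a b c → Spec_solution a b c (solution a b c)

-- ===== LEMMAS AND PROOFS =====

-- pvBubbleStep on a concrete 3-element list, at indices 0 and 1
lemma step0 (x y z : Int) : pvBubbleStep [x, y, z] 0 = if y < x then [y, x, z] else [x, y, z] := by
  simp [pvBubbleStep, PySem.List.pyGet?, PySem.List.pyIdx?]

lemma step1 (x y z : Int) : pvBubbleStep [x, y, z] 1 = if z < y then [x, z, y] else [x, y, z] := by
  simp [pvBubbleStep, PySem.List.pyGet?, PySem.List.pyIdx?]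

-- the bubble loops turn [a,b,c] into [min, middle, max]
lemma bubble_sorts (a b c : Int) :
    (PySem.List.pyRange 0 3 1).foldl
      (fun arr i => (PySem.List.pyRange 0 (3 - i - 1) 1).foldl pvBubbleStep arr) [a, b, c]
    = [min a (min b c), a + b + c - min a (min b c) - max a (max b c), max a (max b c)] := by
  have h3 : PySem.List.pyRange 0 3 1 = [0, 1, 2] := by decide
  have h2 : PySem.List.pyRange 0 (3 - (0:Int) - 1) 1 = [0, 1] := by decide
  have h1 : PySem.List.pyRange 0 (3 - (1:Int) - 1) 1 = [0] := by decide
  have h0 : PySem.List.pyRange 0 (3 - (2:Int) - 1) 1 = ([] : List Int) := by decide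
  simp only [h3, List.foldl_cons, List.foldl_nil, h2, h1, h0]
  rw [step0]
  split_ifs with hab <;> rw [step1] <;> split_ifs with hbc <;> rw [step0] <;>
    split_ifs <;> simp only [List.cons.injEq, and_true] <;> omega

-- the ternary 'X if X < Y else Y' is min
lemma ite_lt_eq_min (X Y : Int) : (if X < Y then X else Y) = min X Y := by
  rw [min_def]; split_ifs <;> omega

-- ===== VERDICT (by name: the statement is the Claim_ definition above) =====
theorem solution_spec : Claim_equal_solution := by
  intro a b c _
  show solution a b c = solution_alt a b c
  unfold solution solution_alt
  simp only [bubble_sorts]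
  exact ite_lt_eq_min _ _
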